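-- pv_equiv track=rewrite | github.com/dereadi/ganuda_ai | services/arc_agi_3/deep_solver.py | get_extra_click_targets
-- ===== SOURCE A (Python) =====
-- from typing import Any, Callable, Dict, List, Optional, Set, Tuple
--
-- def get_extra_click_targets(current_level: int, existing_targets: int) -> List[Dict]:
--     """Suggest additional click targets for deeper levels.
--
--     For levels 2+, we try clicking on grid positions that weren't
--     generated by the default component segmentation.
--     """
--     if current_level < 2:
--         return []
--
--     extras = []
--     # Generate grid-spaced click targets for broader exploration
--     # Level 2: 8x8 grid, Level 3+: 16x16 grid
--     grid_size = 8 if current_level == 2 else 16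
--     step = 64 // grid_size
--
--     for row in range(grid_size):
--         for col in range(grid_size):
--             cx = col * step + step // 2
--             cy = row * step + step // 2
--             target = {'x': cx, 'y': cy}
--             # Avoid duplicates with existing targets
--             extras.append(target)
--
--     # Cap extra targets to avoid explosion
--     max_extras = min(len(extras), 32 * (current_level - 1))
--     return extras[:max_extras]
-- ===== SOURCE B (Python) =====
-- def get_extra_click_targets(current_level: int, existing_targets: int):
--     if current_level < 2:
--         return []
--     grid_size = 8 if current_level == 2 else 16
--     step = 64 // grid_size
--     centers = [c * step + step // 2 for c in range(grid_size)]
--     # The cap 32*(level-1) is always a multiple of grid_size, so it cuts whole rows.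
--     num_rows = min(grid_size, 32 * (current_level - 1) // grid_size)
--     return [{'x': cx, 'y': cy} for cy in centers[:num_rows] for cx in centers]
-- ===== Notes on version B (the rewrite author's own statement) =====
-- stated objective: simpler
-- what changed: Precomputes the list of center coordinates once, converts the 32*(level-1) cap into a whole number of rows (it is always a multiple of grid_size), and builds the result as a cross product of the truncated row-center list with the column-center list, instead of nested index loops plus a post-hoc slice.
import Mathlib
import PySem

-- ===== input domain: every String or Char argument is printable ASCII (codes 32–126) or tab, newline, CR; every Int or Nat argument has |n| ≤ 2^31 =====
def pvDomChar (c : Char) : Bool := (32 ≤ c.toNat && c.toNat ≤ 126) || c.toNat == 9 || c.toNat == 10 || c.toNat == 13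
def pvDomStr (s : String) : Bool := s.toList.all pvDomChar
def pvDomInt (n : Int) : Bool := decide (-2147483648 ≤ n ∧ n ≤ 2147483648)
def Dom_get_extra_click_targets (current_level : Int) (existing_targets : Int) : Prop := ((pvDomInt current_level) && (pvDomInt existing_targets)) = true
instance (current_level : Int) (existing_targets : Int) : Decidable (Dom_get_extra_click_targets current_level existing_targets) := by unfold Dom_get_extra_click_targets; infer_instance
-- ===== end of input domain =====

-- B precomputes the center coordinates once, turns the 32*(level-1) cap into a whole
-- number of rows, and builds the result as a cross product (objective: simpler).
set_option maxRecDepth 4000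


-- ===== PORT A =====
def get_extra_click_targets (current_level : Int) (existing_targets : Int) : List (List (String × Int)) :=
  if current_level < 2 then []
  else
    let grid_size : Int := if current_level = 2 then 8 else 16
    let step : Int := PySem.Int.floordiv 64 grid_size
    let extras : List (List (String × Int)) :=
      (PySem.List.pyRange 0 grid_size 1).foldl (fun acc row =>
        (PySem.List.pyRange 0 grid_size 1).foldl (fun acc2 col =>
          acc2 ++ [[("x", col * step + PySem.Int.floordiv step 2),
                    ("y", row * step + PySem.Int.floordiv step 2)]]) acc) []
    let max_extras : Int := min (extras.length : Int) (32 * (current_level - 1))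
    PySem.List.slice extras none (some max_extras)

-- ===== PORT B =====
def get_extra_click_targets_alt (current_level : Int) (existing_targets : Int) : List (List (String × Int)) :=
  if current_level < 2 then []
  else
    let grid_size : Int := if current_level = 2 then 8 else 16
    let step : Int := PySem.Int.floordiv 64 grid_size
    let centers : List Int :=
      (PySem.List.pyRange 0 grid_size 1).map (fun c => c * step + PySem.Int.floordiv step 2)
    let num_rows : Int := min grid_size (PySem.Int.floordiv (32 * (current_level - 1)) grid_size)
    (PySem.List.slice centers none (some num_rows)).flatMap (fun cy =>
      centers.map (fun cx => [("x", cx), ("y", cy)]))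

-- ===== PRECONDITION & SPEC =====
def Spec_get_extra_click_targets (current_level : Int) (existing_targets : Int) (out : List (List (String × Int))) : Prop := out = get_extra_click_targets_alt current_level existing_targets
instance (current_level : Int) (existing_targets : Int) (out : List (List (String × Int))) : Decidable (Spec_get_extra_click_targets current_level existing_targets out) := by unfold Spec_get_extra_click_targets; infer_instance

-- ===== CLAIM =====
def Claim_equal_get_extra_click_targets : Prop := ∀ (current_level : Int) (existing_targets : Int), Dom_get_extra_click_targets current_level existing_targets → Spec_get_extra_click_targets current_level existing_targets (get_extra_click_targets current_level existing_targets)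

-- ===== LEMMAS AND PROOFS =====

-- For level ≥ 9 both caps saturate and both programs produce the full 16×16 grid.
theorem big_eq (current_level existing_targets : Int) (h2 : ¬ current_level < 2)
    (hne : ¬ current_level = 2) (h9 : 9 ≤ current_level) :
    get_extra_click_targets current_level existing_targets
      = get_extra_click_targets_alt current_level existing_targets := by
  unfold get_extra_click_targets get_extra_click_targets_alt
  rw [if_neg h2, if_neg h2]
  simp only [if_neg hne]
  -- A side: the slice takes the whole list
  generalize hE : (PySem.List.pyRange 0 (16:Int) 1).foldl (fun acc row =>
        (PySem.List.pyRange 0 (16:Int) 1).foldl (fun acc2 col =>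
          acc2 ++ [[("x", col * PySem.Int.floordiv 64 16 + PySem.Int.floordiv (PySem.Int.floordiv 64 16) 2),
                    ("y", row * PySem.Int.floordiv 64 16 + PySem.Int.floordiv (PySem.Int.floordiv 64 16) 2)]]) acc) [] = E
  have hlen : (E.length : Int) = 256 := by rw [← hE]; decide
  have hm1 : min ((E.length : Int)) (32 * (current_level - 1)) = (E.length : Int) := by omega
  -- B side: num_rows saturates at 16
  have hfd : (16:Int) ≤ PySem.Int.floordiv (32 * (current_level - 1)) 16 := by
    rw [PySem.Int.le_floordiv_iff_mul_le (by omega)]; omega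
  have hm2 : min (16:Int) (PySem.Int.floordiv (32 * (current_level - 1)) 16) = 16 := by omega
  rw [hm1, hm2, PySem.List.slice_to_natCast, List.take_length, ← hE]
  decide

-- ===== VERDICT =====
theorem get_extra_click_targets_spec : Claim_equal_get_extra_click_targets := by
  intro cl et _
  unfold Spec_get_extra_click_targets
  by_cases h2 : cl < 2
  · simp [get_extra_click_targets, get_extra_click_targets_alt, h2]
  · by_cases h9 : 9 ≤ cl
    · exact big_eq cl et h2 (by omega) h9
    · have h : ∀ c : Int, 2 ≤ c → c ≤ 8 →
          get_extra_click_targets c 0 = get_extra_click_targets_alt c 0 := by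
        intro c hc1 hc2; interval_cases c <;> decide
      -- existing_targets is unused by both ports
      have hx : get_extra_click_targets cl et = get_extra_click_targets cl 0 := rfl
      have hy : get_extra_click_targets_alt cl et = get_extra_click_targets_alt cl 0 := rfl
      rw [hx, hy]; exact h cl (by omega) (by omega)
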